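-- pv_equiv track=rewrite | github.com/bartcowski/AntColonyAlgorithm-Python3 | AntColony.py | get_grouped_paths
-- ===== SOURCE A (Python) =====
-- def get_grouped_paths(ants_population_paths):
--     grouped_paths = []   # containing tuples of (path, number of those paths found in ants_population_paths)
--
--     for ant_path in ants_population_paths:
--         in_list = False
--         for path in grouped_paths:
--             if ant_path == path[0]:
--                 new_size = path[1] + 1
--                 grouped_paths.remove((path[0], path[1]))
--                 grouped_paths.append((ant_path, new_size))
--                 in_list = True
--                 break
--         if not in_list:
--             grouped_paths.append((ant_path, 1))
--     return grouped_paths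
-- ===== SOURCE B (Python) =====
-- def get_grouped_paths(ants_population_paths):
--     # A distinct path appears once, at its LAST occurrence, with its total count.
--     return [(p, ants_population_paths.count(p))
--             for i, p in enumerate(ants_population_paths)
--             if p not in ants_population_paths[i + 1:]]
-- ===== Notes on version B (the rewrite author's own statement) =====
-- stated objective: simpler
-- what changed: A's stateful accumulator with a linear scan plus remove/append move-to-end per element is replaced by a single declarative comprehension keeping each path at its last occurrence paired with its total count.
import Mathlib
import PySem

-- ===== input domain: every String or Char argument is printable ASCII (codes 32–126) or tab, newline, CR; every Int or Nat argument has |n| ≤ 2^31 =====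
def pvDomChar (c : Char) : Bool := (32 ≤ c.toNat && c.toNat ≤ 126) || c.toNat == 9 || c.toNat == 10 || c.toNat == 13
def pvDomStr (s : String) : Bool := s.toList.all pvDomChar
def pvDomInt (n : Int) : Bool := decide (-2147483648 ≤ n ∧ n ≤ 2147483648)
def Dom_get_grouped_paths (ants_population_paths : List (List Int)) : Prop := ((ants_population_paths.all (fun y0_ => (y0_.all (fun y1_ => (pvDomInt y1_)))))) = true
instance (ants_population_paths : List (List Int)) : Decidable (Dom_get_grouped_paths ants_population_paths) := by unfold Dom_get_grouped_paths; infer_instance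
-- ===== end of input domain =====

-- B replaces A's stateful move-to-end accumulator with a one-line comprehension keeping each
-- path at its last occurrence with its total count (objective: simpler; same O(n^2) cost).

-- ===== PORT A =====
def get_grouped_paths (ants_population_paths : List (List Int)) : List (List Int × Int) :=
  ants_population_paths.foldl
    (fun grouped_paths ant_path =>
      -- inner 'for path in grouped_paths … break' = first match
      match grouped_paths.find? (fun path => ant_path == path.1) with
      | some path =>
          ((PySem.List.remove? grouped_paths (path.1, path.2)).getD grouped_paths)
            ++ [(ant_path, path.2 + 1)]
      | none => grouped_paths ++ [(ant_path, 1)])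
    []

-- ===== PORT B =====
def get_grouped_paths_alt (ants_population_paths : List (List Int)) : List (List Int × Int) :=
  ((PySem.List.enumerate ants_population_paths).filter
      (fun ip => !((PySem.List.slice ants_population_paths (some (ip.1 + 1)) none).contains ip.2))).map
    (fun ip => (ip.2, (PySem.List.count ants_population_paths ip.2 : Int)))

-- ===== PRECONDITION & SPEC =====
def Spec_get_grouped_paths (ants_population_paths : List (List Int)) (out : List (List Int × Int)) : Prop := out = get_grouped_paths_alt ants_population_paths
instance (ants_population_paths : List (List Int)) (out : List (List Int × Int)) : Decidable (Spec_get_grouped_paths ants_population_paths out) := by unfold Spec_get_grouped_paths; infer_instance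

-- ===== CLAIM (what is proved, stated in full; the proofs are below) =====
def Claim_equal_get_grouped_paths : Prop := ∀ (ants_population_paths : List (List Int)), Dom_get_grouped_paths ants_population_paths → Spec_get_grouped_paths ants_population_paths (get_grouped_paths ants_population_paths)

-- ===== LEMMAS AND PROOFS =====

-- the distinct paths of xs, each kept at its LAST occurrence
def keepLast : List (List Int) → List (List Int)
  | [] => []
  | p :: rest => if p ∈ rest then keepLast rest else p :: keepLast rest

theorem mem_keepLast (xs : List (List Int)) (p : List Int) : p ∈ keepLast xs ↔ p ∈ xs := by
  induction xs with
  | nil => simp [keepLast]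
  | cons y rest ih =>
    by_cases h : y ∈ rest
    · simp [keepLast, h, ih]; rintro rfl; exact h
    · simp [keepLast, h, ih]

theorem nodup_keepLast (xs : List (List Int)) : (keepLast xs).Nodup := by
  induction xs with
  | nil => simp [keepLast]
  | cons y rest ih =>
    by_cases h : y ∈ rest <;> simp [keepLast, h, ih]
    simpa [mem_keepLast] using h

theorem keepLast_append (xs : List (List Int)) (x : List Int) :
    keepLast (xs ++ [x]) = (keepLast xs).filter (fun p => p != x) ++ [x] := by
  induction xs with
  | nil => simp [keepLast]
  | cons y rest ih =>
    by_cases h : y ∈ rest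
    · simp [keepLast, h, ih]
    · by_cases hx : y = x
      · subst hx; simp [keepLast, h, ih]
      · simp [keepLast, h, hx, ih]

theorem filt_keys (outer : List (List Int)) :
    ∀ (xs : List (List Int)) (s : Nat), outer.drop s = xs →
    ((PySem.List.enumerate xs (s : Int)).filter
        (fun ip => !((PySem.List.slice outer (some (ip.1 + 1)) none).contains ip.2))).map (·.2)
      = keepLast xs := by
  intro xs
  induction xs with
  | nil => intro s _; simp [PySem.List.enumerate, keepLast]
  | cons y rest ih =>
    intro s hdrop
    have hrest : outer.drop (s + 1) = rest := by
      rw [← List.tail_drop, hdrop]; rfl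
    have hcast : ((s : Int) + 1) = ((s + 1 : Nat) : Int) := by push_cast; ring
    have hslice : PySem.List.slice outer (some ((s : Int) + 1)) none = rest := by
      rw [hcast, PySem.List.slice_from_natCast, hrest]
    have ihr := ih (s + 1) hrest
    rw [← hcast] at ihr
    rw [PySem.List.enumerate_cons, List.filter_cons]
    by_cases h : y ∈ rest
    · simp [hslice, keepLast, h]
      simpa using ihr
    · simp [hslice, keepLast, h]
      simpa using ihr

theorem alt_eq (xs : List (List Int)) :
    get_grouped_paths_alt xs = (keepLast xs).map (fun p => (p, (PySem.List.count xs p : Int))) := by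
  have h := filt_keys xs xs 0 (by simp)
  rw [Nat.cast_zero] at h
  unfold get_grouped_paths_alt
  rw [← h, List.map_map]
  rfl

theorem find?_beq_self (l : List (List Int)) (x : List Int) (h : x ∈ l) :
    l.find? (fun p => x == p) = some x := by
  induction l with
  | nil => simp at h
  | cons y rest ih =>
    rcases List.mem_cons.mp h with rfl | hy
    · simp [List.find?]
    · by_cases hxy : x = y
      · subst hxy; simp [List.find?]
      · rw [List.find?_cons_of_neg (by simp [hxy])]; exact ih hy

theorem cnt_inj (xs : List (List Int)) :
    Function.Injective (fun p => (p, (PySem.List.count xs p : Int))) := by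
  intro a b h
  exact congrArg Prod.fst h

theorem foldA (xs : List (List Int)) :
    get_grouped_paths xs = (keepLast xs).map (fun p => (p, (PySem.List.count xs p : Int))) := by
  induction xs using List.reverseRecOn with
  | nil => rfl
  | append_singleton xs x ih =>
    unfold get_grouped_paths at ih ⊢
    rw [List.foldl_append, List.foldl_cons, List.foldl_nil, ih]
    by_cases hx : x ∈ xs
    · -- x seen before: A moves its (now unique) entry to the end with count+1
      have hxl : x ∈ keepLast xs := (mem_keepLast xs x).mpr hx
      have hfind : (List.map (fun p => (p, (PySem.List.count xs p : Int))) (keepLast xs)).find?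
          (fun path => x == path.1) = some (x, (PySem.List.count xs x : Int)) := by
        rw [List.find?_map]
        have h1 : (keepLast xs).find?
            ((fun path => x == path.1) ∘ (fun p => (p, (PySem.List.count xs p : Int)))) = some x := by
          simpa [Function.comp] using find?_beq_self (keepLast xs) x hxl
        rw [h1]; rfl
      have hmm : (x, (PySem.List.count xs x : Int)) ∈
          List.map (fun p => (p, (PySem.List.count xs p : Int))) (keepLast xs) :=
        List.mem_map_of_mem hxl
      have hrem := PySem.List.remove?_eq_some_erase _ _ hmm
      have hnd : (List.map (fun p => (p, (PySem.List.count xs p : Int))) (keepLast xs)).Nodup :=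
        List.Nodup.map (cnt_inj xs) (nodup_keepLast xs)
      simp only [hfind, hrem, Option.getD_some, hnd.erase_eq_filter, List.filter_map]
      have hpred : ((fun z => z != (x, (PySem.List.count xs x : Int))) ∘
          (fun p => (p, (PySem.List.count xs p : Int)))) = (fun p => p != x) := by
        funext p
        by_cases hp : p = x
        · subst hp; simp
        · simp [bne, hp]
      rw [hpred, keepLast_append, List.map_append]
      congr 1
      · apply List.map_congr_left
        intro p hp
        have hpx : p ≠ x := by simpa using List.of_mem_filter hp
        simp [PySem.List.count_eq, List.count_append, Ne.symm hpx]
      · simp [PySem.List.count_eq, List.count_append, List.count_singleton]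
    · -- x new: A appends (x, 1)
      have hfind : (List.map (fun p => (p, (PySem.List.count xs p : Int))) (keepLast xs)).find?
          (fun path => x == path.1) = none := by
        rw [List.find?_eq_none]
        intro z hz
        obtain ⟨p, hpl, rfl⟩ := List.mem_map.mp hz
        simp only [beq_iff_eq]
        intro h
        exact hx (h ▸ (mem_keepLast xs p).mp hpl)
      simp only [hfind]
      rw [keepLast_append, List.map_append]
      congr 1
      · have hfilt : List.filter (fun p => p != x) (keepLast xs) = keepLast xs := by
          rw [List.filter_eq_self]
          intro p hp
          simp only [bne_iff_ne, ne_eq]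
          intro h
          exact hx (h ▸ (mem_keepLast xs p).mp hp)
        rw [hfilt]
        apply List.map_congr_left
        intro p hp
        have hpx : p ≠ x := fun h => hx (h ▸ (mem_keepLast xs p).mp hp)
        simp [PySem.List.count_eq, List.count_append, Ne.symm hpx]
      · have h0 : List.count x xs = 0 := List.count_eq_zero.mpr hx
        simp [PySem.List.count_eq, List.count_append, List.count_singleton, h0]

-- ===== VERDICT (by name: the statement is the Claim_ definition above) =====
theorem get_grouped_paths_spec : Claim_equal_get_grouped_paths := by
  intro xs _
  unfold Spec_get_grouped_paths
  rw [foldA, alt_eq]
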